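-- pv_equiv track=rewrite | github.com/apparentorder/aoc | 2019/aoc4.py | fixup_increase
-- ===== SOURCE A (Python) =====
-- def fixup_increase(pw):
-- 	out = list(map(int, str(pw)))
--
-- 	min_digit = 0
-- 	fill = False
-- 	for i in range(0, len(out)):
-- 		if fill or out[i] < min_digit:
-- 			out[i] = min_digit
-- 			fill = True
-- 		else:
-- 			min_digit = int(out[i])
--
-- 	outstr = "".join(map(str, out))
--
-- 	return int(outstr)
-- ===== SOURCE B (Python) =====
-- def fixup_increase(pw):
-- 	s = str(pw)
-- 	out = ""
-- 	for i in range(len(s)):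
-- 		p = s[:i+1]
-- 		out += s[i] if sorted(p) == list(p) else out[-1]
-- 	return int(out)
-- ===== Notes on version B (the rewrite author's own statement) =====
-- stated objective: alternative
-- what changed: B drops A's digit-list conversion and stateful min_digit/fill pass entirely: it walks the numeral string and decides each output character by an independent per-prefix sortedness test (sorted(p) == list(p)), copying the previous output character once a prefix stops being sorted.
import Mathlib
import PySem

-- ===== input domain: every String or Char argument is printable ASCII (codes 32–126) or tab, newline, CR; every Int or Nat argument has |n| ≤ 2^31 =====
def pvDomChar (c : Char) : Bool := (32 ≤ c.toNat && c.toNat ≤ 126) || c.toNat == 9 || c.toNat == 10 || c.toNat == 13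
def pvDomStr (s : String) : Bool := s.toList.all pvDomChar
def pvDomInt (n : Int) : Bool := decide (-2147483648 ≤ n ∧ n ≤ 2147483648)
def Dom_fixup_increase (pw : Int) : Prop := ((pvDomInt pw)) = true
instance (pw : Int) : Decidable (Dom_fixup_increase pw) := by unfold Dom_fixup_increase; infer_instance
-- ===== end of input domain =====

-- B replaces A's digit-list pass with min_digit/fill state by per-prefix sortedness tests on the
-- numeral string; return values proved equal on Pre_ (pw ≥ 0).

-- ===== PORT A =====
-- out = list(map(int, str(pw))): int(c) per character (ValueError on '-' of a negative pw is outside Pre_,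
-- so the getD 0 default is unreachable there)
def pvDigit (c : Char) : Int := (PySem.Int.ofStr? (String.ofList [c])).getD 0
def pvDigits (pw : Int) : List Int := (PySem.Int.toStr pw).toList.map pvDigit

-- int("".join(map(str, out))); on Pre_ the joined digit string is nonempty so int never raises
def pvRebuild (out : List Int) : Int :=
  (PySem.Int.ofStr? (PySem.Str.join "" (out.map PySem.Int.toStr))).getD 0

-- A's for-loop over indices, carried as structural recursion over the digit list with the (min_digit, fill) state
def fixupLoop : Int → Bool → List Int → List Int
  | _, _, [] => []
  | mind, fill, x :: r =>
    if fill || x < mind then mind :: fixupLoop mind true r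
    else x :: fixupLoop x fill r

def fixup_increase (pw : Int) : Int :=
  pvRebuild (fixupLoop 0 false (pvDigits pw))

-- ===== PORT B =====
-- one loop iteration: out += s[i] if sorted(p) == list(p) else out[-1]
-- (out[-1] is only reached with i ≥ 1, where out is nonempty: the getD ' ' default is unreachable)
def bStep (s out : List Char) (i : Int) : List Char :=
  let p := PySem.List.slice s none (some (i + 1))
  out ++ (if PySem.List.sorted p (fun c => c) = p
          then [PySem.List.pyGetD s i ' ']
          else [PySem.List.pyGetD out (-1) ' '])

def fixup_increase_alt (pw : Int) : Int :=
  let s := (PySem.Int.toStr pw).toList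
  (PySem.Int.ofChars?
    ((PySem.List.pyRange 0 (PySem.List.len s) 1).foldl (bStep s) [])).getD 0

-- ===== PRECONDITION & SPEC =====
-- Pre_ excludes negative inputs: there str(pw) carries a leading minus sign and A raises ValueError
-- when int() parses that lone sign character.
def Pre_fixup_increase (pw : Int) : Prop := 0 ≤ pw
instance (pw : Int) : Decidable (Pre_fixup_increase pw) := by unfold Pre_fixup_increase; infer_instance
def pvWitness_fixup_increase : Int := 223450

def Spec_fixup_increase (pw : Int) (out : Int) : Prop := out = fixup_increase_alt pw
instance (pw : Int) (out : Int) : Decidable (Spec_fixup_increase pw out) := by unfold Spec_fixup_increase; infer_instance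

-- ===== CLAIM (what is proved, stated in full; the proofs are below) =====
def Claim_equal_fixup_increase : Prop := ∀ (pw : Int), Dom_fixup_increase pw → Pre_fixup_increase pw → Spec_fixup_increase pw (fixup_increase pw)

-- ===== LEMMAS AND PROOFS =====

-- the ten characters str(pw) is made of when pw ≥ 0
def DIG : List Char := ['0','1','2','3','4','5','6','7','8','9']

-- the integer value of a digit character
def chVal (c : Char) : Int := (c.toNat : Int) - 48

-- length of the longest non-decreasing run continuing prev (chars / ints)
def runC : Char → List Char → Nat
  | _, [] => 0
  | prev, x :: r => if prev ≤ x then 1 + runC x r else 0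

def ndRun : Int → List Int → Nat
  | _, [] => 0
  | prev, x :: r => if prev ≤ x then 1 + ndRun x r else 0

lemma digitChar_mem (n : Nat) (h : n < 10) : Nat.digitChar n ∈ DIG := by
  interval_cases n <;> decide

lemma toDigitsCore_mem (f n : Nat) (acc : List Char) (hacc : ∀ c ∈ acc, c ∈ DIG) :
    ∀ c ∈ Nat.toDigitsCore 10 f n acc, c ∈ DIG := by
  induction f generalizing n acc with
  | zero => simpa [Nat.toDigitsCore] using hacc
  | succ f ih =>
    rw [Nat.toDigitsCore]
    split
    · intro c hc
      rcases List.mem_cons.mp hc with rfl | h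
      · exact digitChar_mem _ (Nat.mod_lt _ (by omega))
      · exact hacc _ h
    · exact ih _ _ (fun c hc => by
        rcases List.mem_cons.mp hc with rfl | h
        · exact digitChar_mem _ (Nat.mod_lt _ (by omega))
        · exact hacc _ h)

lemma toChars_mem (m : Int) (hm : 0 ≤ m) : ∀ c ∈ PySem.Int.toChars m, c ∈ DIG := by
  unfold PySem.Int.toChars
  rw [if_neg (by omega)]
  exact toDigitsCore_mem _ _ _ (by simp)

lemma toDigitsCore_ne_nil (f n : Nat) (acc : List Char) (h : 0 < f ∨ acc ≠ []) :
    Nat.toDigitsCore 10 f n acc ≠ [] := by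
  induction f generalizing n acc with
  | zero => rcases h with h | h; · omega
            · simpa [Nat.toDigitsCore] using h
  | succ f ih =>
    rw [Nat.toDigitsCore]
    split
    · simp
    · exact ih _ _ (Or.inr (by simp))

lemma toChars_ne_nil (m : Int) (hm : 0 ≤ m) : PySem.Int.toChars m ≠ [] := by
  unfold PySem.Int.toChars
  rw [if_neg (by omega)]
  exact toDigitsCore_ne_nil _ _ _ (Or.inl (by omega))

lemma pvDigit_eq_chVal (c : Char) (h : c ∈ DIG) : pvDigit c = chVal c := by
  fin_cases h <;> decide

lemma toChars_chVal (c : Char) (h : c ∈ DIG) : PySem.Int.toChars (chVal c) = [c] := by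
  fin_cases h <;> decide

lemma chVal_le_iff (a b : Char) : chVal a ≤ chVal b ↔ a ≤ b := by
  rw [Char.le_def]
  unfold chVal
  constructor <;> intro h
  · exact_mod_cast (by omega : (a.toNat : Int) ≤ b.toNat)
  · have : (a.toNat : Int) ≤ b.toNat := by exact_mod_cast h
    omega

lemma runC_eq_ndRun (prev : Char) (t : List Char) :
    ndRun (chVal prev) (t.map chVal) = runC prev t := by
  induction t generalizing prev with
  | nil => rfl
  | cons x r ih =>
    simp only [List.map_cons, ndRun, runC, chVal_le_iff]
    split <;> simp [ih]

lemma runC_le (prev : Char) (t : List Char) : runC prev t ≤ t.length := by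
  induction t generalizing prev with
  | nil => simp [runC]
  | cons x r ih =>
    simp only [runC, List.length_cons]
    split
    · have := ih x; omega
    · omega

lemma pairwise_cons_cons (a b : Char) (l : List Char) :
    (a :: b :: l).Pairwise (· ≤ ·) ↔ a ≤ b ∧ (b :: l).Pairwise (· ≤ ·) := by
  constructor
  · intro h
    rcases List.pairwise_cons.mp h with ⟨ha, ht⟩
    exact ⟨ha b (by simp), ht⟩
  · rintro ⟨hab, ht⟩
    refine List.pairwise_cons.mpr ⟨?_, ht⟩
    intro y hy
    rcases List.mem_cons.mp hy with rfl | hy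
    · exact hab
    · exact le_trans hab ((List.pairwise_cons.mp ht).1 y hy)

-- the per-prefix sorted test: take m of (prev :: l) is non-decreasing iff m ≤ 1 + runC prev l
lemma pairwise_take_iff (prev : Char) (l : List Char) (m : Nat) (hm : m ≤ l.length + 1) :
    (List.take m (prev :: l)).Pairwise (· ≤ ·) ↔ m ≤ 1 + runC prev l := by
  induction l generalizing prev m with
  | nil =>
    have hm1 : m ≤ 1 := by simpa using hm
    interval_cases m <;> simp [runC]
  | cons x r ih =>
    simp only [List.length_cons] at hm
    match m with
    | 0 => simp
    | 1 => simp
    | (k + 2) =>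
      have h1 : List.take (k + 2) (prev :: x :: r) = prev :: x :: List.take k r := rfl
      rw [h1]
      have h2 : (x :: List.take k r) = List.take (k + 1) (x :: r) := rfl
      rw [pairwise_cons_cons, h2, ih x (k + 1) (by simp; omega)]
      have hrw : runC prev (x :: r) = if prev ≤ x then 1 + runC x r else 0 := rfl
      rw [hrw]
      by_cases hx : prev ≤ x
      · rw [if_pos hx]
        simp only [hx, true_and]
        omega
      · rw [if_neg hx]
        simp only [hx, false_and, false_iff]
        omega

lemma sorted_id_eq_iff (l : List Char) :
    PySem.List.sorted l (fun c => c) = l ↔ l.Pairwise (· ≤ ·) := by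
  constructor
  · intro h
    have := PySem.List.sorted_pairwise l (fun c => c)
    rw [h] at this
    exact this
  · intro h
    exact PySem.List.sorted_eq_self_of_pairwise l (fun c => c) h

lemma getLast_take_append_replicate (s : List Char) (L j : Nat) (c : Char)
    (hL1 : 1 ≤ L) (hLn : L ≤ s.length) (hc : c = s.getD (L - 1) ' ')
    (hne : s.take L ++ List.replicate j c ≠ []) :
    (s.take L ++ List.replicate j c).getLast hne = c := by
  cases j with
  | zero =>
    simp only [List.replicate, List.append_nil] at hne ⊢
    rw [List.getLast_eq_getElem]
    have hlen : (s.take L).length = L := by simp; omega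
    rw [hc, List.getD_eq_getElem s ' ' (by omega)]
    simp only [hlen]
    rw [List.getElem_take]
  | succ j' =>
    rw [List.getLast_append_of_ne_nil hne (by simp)]
    exact List.getLast_replicate _

-- B's loop characterised: after m steps, the kept prefix capped at L = 1 + runC, then the flood
lemma bFold_eq (h : Char) (t : List Char) (m : Nat) (hm : m ≤ t.length + 1) :
    (List.range m).foldl (fun (out : List Char) (k : Nat) => bStep (h :: t) out (k : Int)) [] =
      (h :: t).take (min m (1 + runC h t)) ++
        List.replicate (m - (1 + runC h t)) ((h :: t).getD (1 + runC h t - 1) ' ') := by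
  induction m with
  | zero => simp
  | succ m ih =>
    set s : List Char := h :: t with hs
    set L : Nat := 1 + runC h t with hLdef
    have hL1 : 1 ≤ L := by omega
    have hLn : L ≤ s.length := by
      have := runC_le h t
      simp [hs, hLdef]; omega
    have hmn : m < s.length := by simp [hs]; omega
    rw [List.range_succ, List.foldl_append, ih (by omega)]
    simp only [List.foldl_cons, List.foldl_nil]

    simp only [bStep]
    have hslice : PySem.List.slice s none (some ((m : Int) + 1)) = s.take (m + 1) := by
      have : ((m : Int) + 1) = ((m + 1 : Nat) : Int) := by push_cast; ring
      rw [this, PySem.List.slice_to_natCast]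
    rw [hslice]
    have hiff : ((PySem.List.sorted (s.take (m + 1)) fun c => c) = s.take (m + 1)) ↔ m + 1 ≤ L := by
      rw [hs] at *
      exact (sorted_id_eq_iff _).trans (pairwise_take_iff h t (m + 1) (by simpa using hm))
    by_cases hcase : m + 1 ≤ L
    · rw [if_pos (hiff.mpr hcase)]
      have hminm : min m L = m := by omega
      have hrep : m - L = 0 := by omega
      have hminm1 : min (m + 1) L = m + 1 := by omega
      have hrep1 : m + 1 - L = 0 := by omega
      rw [hminm, hrep, hminm1, hrep1]
      simp only [List.replicate, List.append_nil]
      rw [PySem.List.pyGetD_natCast, List.take_add_one, List.getD_eq_getElem s ' ' hmn]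
      simp [List.getElem?_eq_getElem hmn]
    · rw [if_neg (fun hc => hcase (hiff.mp hc))]
      have hLm : L ≤ m := by omega
      have hminm : min m L = L := by omega
      have hminm1 : min (m + 1) L = L := by omega
      rw [hminm, hminm1]
      have hne : s.take L ++ List.replicate (m - L) (s.getD (L - 1) ' ') ≠ [] := by
        simp only [ne_eq, List.append_eq_nil_iff, not_and]
        intro htk
        have := congrArg List.length htk
        simp at this
        omega
      rw [PySem.List.pyGetD_neg_one _ _ hne,
        getLast_take_append_replicate s L (m - L) _ hL1 hLn rfl hne]
      rw [List.append_assoc, ← List.replicate_succ']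
      have : m - L + 1 = m + 1 - L := by omega
      rw [this]

lemma fixupLoop_fill (prev : Int) (l : List Int) :
    fixupLoop prev true l = List.replicate l.length prev := by
  induction l with
  | nil => rfl
  | cons x r ih => simp [fixupLoop, ih, List.replicate]

-- A's pass characterised: non-decreasing prefix kept, tail flooded with the element before the break
lemma fixupLoop_eq (t : List Int) (prev : Int) :
    fixupLoop prev false t =
      t.take (ndRun prev t) ++
        List.replicate (t.length - ndRun prev t) ((prev :: t).getD (ndRun prev t) 0) := by
  induction t generalizing prev with
  | nil => rfl
  | cons x r ih =>
    by_cases h : prev ≤ x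
    · have hx : ¬ x < prev := not_lt.mpr h
      simp only [fixupLoop, hx, Bool.false_or, ndRun, if_pos h]
      rw [ih x, Nat.add_comm 1 (ndRun x r)]
      simp [Nat.succ_sub_succ]
    · have hx : x < prev := lt_of_not_ge h
      simp only [fixupLoop, hx, Bool.false_or, ndRun, if_neg h]
      rw [fixupLoop_fill]
      simp [List.replicate, List.getD]

-- ===== VERDICT (by name: the statement is the Claim_ definition above) =====
theorem fixup_increase_spec : Claim_equal_fixup_increase := by
  intro pw _ hpre
  unfold Spec_fixup_increase
  simp only [fixup_increase, fixup_increase_alt, pvRebuild, pvDigits, PySem.Int.toList_toStr]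
  set s : List Char := PySem.Int.toChars pw with hsdef
  have hdig : ∀ c ∈ s, c ∈ DIG := toChars_mem pw hpre
  obtain ⟨h, t, hs⟩ : ∃ h t, s = h :: t := by
    rcases hq : s with _ | ⟨h, t⟩
    · exact absurd (hsdef.symm.trans hq) (toChars_ne_nil pw hpre)
    · exact ⟨h, t, rfl⟩

  set L : Nat := 1 + runC h t with hLdef
  have hL1 : 1 ≤ L := by omega
  have hrle := runC_le h t
  have hLn : L ≤ s.length := by rw [hs]; simp [hLdef]; omega
  -- B's character list
  have hB : (PySem.List.pyRange 0 (PySem.List.len s) 1).foldl (bStep s) [] =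
      s.take L ++ List.replicate (s.length - L) (s.getD (L - 1) ' ') := by
    rw [PySem.List.len_eq, PySem.List.pyRange_zero_nat, List.foldl_map, hs]
    simp only [List.length_cons]
    rw [bFold_eq h t (t.length + 1) (le_refl _)]
    have hmin : min (t.length + 1) L = L := by omega
    rw [hmin]
  -- A's digit list is the value image of B's character list
  have hmap : s.map pvDigit = s.map chVal :=
    List.map_congr_left (fun c hc => pvDigit_eq_chVal c (hdig c hc))
  have hval0 : 0 ≤ chVal h := by
    have := hdig h (by rw [hs]; exact List.mem_cons_self)
    fin_cases this <;> decide
  have hA : fixupLoop 0 false (s.map pvDigit) =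
      (s.take L ++ List.replicate (s.length - L) (s.getD (L - 1) ' ')).map chVal := by
    rw [hmap, hs, List.map_cons, fixupLoop_eq]
    have hnd : ndRun 0 (chVal h :: t.map chVal) = L := by
      have h1 : ndRun 0 (chVal h :: t.map chVal) =
          if (0 : Int) ≤ chVal h then 1 + ndRun (chVal h) (t.map chVal) else 0 := rfl
      rw [h1, if_pos hval0, runC_eq_ndRun, hLdef]
    rw [hnd, List.map_append, List.map_take, List.map_replicate]
    refine congrArg₂ (· ++ ·) rfl (congrArg₂ List.replicate (by simp) ?_)
    -- the flood value
    have hlt : L - 1 < (h :: t).length := by simp; omega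
    have hstep : (0 :: chVal h :: t.map chVal).getD L 0 =
        (chVal h :: t.map chVal).getD (L - 1) 0 := by
      rcases Nat.exists_eq_add_of_le hL1 with ⟨k, hk⟩
      rw [hk, Nat.add_comm 1 k]
      simp only [Nat.add_sub_cancel]
      exact List.getD_cons_succ
    rw [hstep]
    show (List.map chVal (h :: t)).getD (L - 1) 0 = chVal ((h :: t).getD (L - 1) ' ')
    rw [List.getD_eq_getElem _ 0 (by simpa using hlt),
      List.getD_eq_getElem _ ' ' hlt, List.getElem_map]
  rw [hA, hB]
  -- both rebuilds parse the same character list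
  set w : List Char := s.take L ++ List.replicate (s.length - L) (s.getD (L - 1) ' ') with hw
  have hwmem : ∀ c ∈ w, c ∈ DIG := by
    intro c hc
    rcases List.mem_append.mp (hw ▸ hc) with hc' | hc'
    · exact hdig c (List.mem_of_mem_take hc')
    · rw [List.eq_of_mem_replicate hc']
      rw [List.getD_eq_getElem s ' ' (by omega)]
      exact hdig _ (List.getElem_mem _)
  have hjoin : PySem.Str.join "" ((w.map chVal).map PySem.Int.toStr) = String.ofList w := by
    have hlist : (PySem.Str.join "" ((w.map chVal).map PySem.Int.toStr)).toList = w := by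
      rw [PySem.Str.toList_join]
      have hmaps : ((w.map chVal).map PySem.Int.toStr).map String.toList =
          w.map (fun c => [c]) := by
        rw [List.map_map, List.map_map]
        apply List.map_congr_left
        intro c hc
        simp only [Function.comp]
        rw [PySem.Int.toList_toStr, toChars_chVal c (hwmem c hc)]
      rw [hmaps]
      have hsep : ("" : String).toList = [] := rfl
      rw [hsep, PySem.Chars.join_nil_singletons]
    apply String.toList_inj.mp
    rw [hlist, String.toList_ofList]
  rw [hjoin, PySem.Int.ofStr?_ofList]
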